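-- pv_equiv track=rewrite | github.com/rombr/Message-Gate | util.py | CheckMessageText
-- ===== SOURCE A (Python) =====
-- def CheckMessageText(s):
--     '''Преобразование строки для хранения и вывода
--     '''
--     replace_map = {
--                    #'&' : '&amp;',
--                    '"' : '&quot;',
--                    "'" : '&#039;',
--                    '<' : '&lt;',
--                    '>' : '&gt;',
--                    }
--     s = s.strip()
--     for k, v in replace_map.items(): s = s.replace(k, v)
--     return s
-- ===== SOURCE B (Python) =====
-- def CheckMessageText(s):
--     '''Преобразование строки для хранения и вывода
--     '''
--     out = []
--     for c in s.strip():
--         if c == '"':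
--             out.append('&quot;')
--         elif c == "'":
--             out.append('&#039;')
--         elif c == '<':
--             out.append('&lt;')
--         elif c == '>':
--             out.append('&gt;')
--         else:
--             out.append(c)
--     return ''.join(out)
-- ===== Notes on version B (the rewrite author's own statement) =====
-- stated objective: alternative
-- what changed: Replaces four full-string str.replace passes driven by a dict with a single character loop using an explicit if/elif chain and a list accumulator joined at the end; the dict disappears and the string is traversed once.
import Mathlib
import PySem

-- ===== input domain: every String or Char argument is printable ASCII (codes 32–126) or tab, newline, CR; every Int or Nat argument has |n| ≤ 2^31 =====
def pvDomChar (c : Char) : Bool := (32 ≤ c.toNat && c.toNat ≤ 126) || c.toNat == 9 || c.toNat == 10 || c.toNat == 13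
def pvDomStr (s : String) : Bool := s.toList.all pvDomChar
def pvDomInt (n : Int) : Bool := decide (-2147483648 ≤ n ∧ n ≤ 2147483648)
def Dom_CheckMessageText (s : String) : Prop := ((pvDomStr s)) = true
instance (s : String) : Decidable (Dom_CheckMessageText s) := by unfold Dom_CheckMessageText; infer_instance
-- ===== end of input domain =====

-- B escapes in one character loop with an if/elif chain and a list accumulator joined at the end, instead of A's four dict-driven full-string replace passes; one traversal, similar cost.


-- ===== PORT A =====
-- literal port: build the replace map, strip, then one str.replace pass per map item
def CheckMessageText (s : String) : String :=
  let replaceMap : PySem.Dict String String :=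
    PySem.Dict.ofList [("\"", "&quot;"), ("'", "&#039;"), ("<", "&lt;"), (">", "&gt;")]
  let s := PySem.Str.strip s
  replaceMap.items.foldl (fun s kv => PySem.Str.replace s kv.1 kv.2) s

-- ===== PORT B =====
-- the if/elif chain of Source B's loop body
def escCMT (c : Char) : String :=
  if c = '"' then "&quot;"
  else if c = '\'' then "&#039;"
  else if c = '<' then "&lt;"
  else if c = '>' then "&gt;"
  else String.ofList [c]

-- literal port of Source B: loop over the stripped characters appending to an accumulator, then join
def CheckMessageText_alt (s : String) : String :=
  let out := (PySem.Str.strip s).toList.foldl (fun acc c => acc ++ [escCMT c]) []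
  PySem.Str.join "" out

-- ===== PRECONDITION & SPEC =====
def Spec_CheckMessageText (s : String) (out : String) : Prop := out = CheckMessageText_alt s
instance (s : String) (out : String) : Decidable (Spec_CheckMessageText s out) := by unfold Spec_CheckMessageText; infer_instance

-- ===== CLAIM =====
def Claim_equal_CheckMessageText : Prop := ∀ (s : String), Dom_CheckMessageText s → Spec_CheckMessageText s (CheckMessageText s)

-- ===== LEMMAS AND PROOFS =====

-- single-character replace is a flatMap over the characters
theorem replace_go_single (k : Char) (new : List Char) :
    ∀ (l : List Char) (fuel : Nat) (acc : List Char), l.length ≤ fuel →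
      PySem.Chars.replace.go [k] new fuel l acc =
        acc.reverse ++ l.flatMap (fun c => if c = k then new else [c]) := by
  intro l
  induction l with
  | nil =>
    intro fuel acc _
    cases fuel <;> simp [PySem.Chars.replace.go]
  | cons c t ih =>
    intro fuel acc hle
    cases fuel with
    | zero => simp at hle
    | succ fuel =>
      by_cases hc : c = k
      · subst hc
        have hpre : List.isPrefixOf [c] (c :: t) = true := by
          simp [List.isPrefixOf]
        simp only [PySem.Chars.replace.go, hpre, if_true, List.length_cons] at *
        have hdrop : List.drop (([] : List Char).length + 1) (c :: t) = t := by simp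
        rw [hdrop, ih fuel _ (by omega)]
        simp
      · have hpre : List.isPrefixOf [k] (c :: t) = false := by
          simp [List.isPrefixOf]
          exact fun h => hc h.symm
        rw [show PySem.Chars.replace.go [k] new (fuel+1) (c :: t) acc =
              PySem.Chars.replace.go [k] new fuel t (c :: acc) by
            simp [PySem.Chars.replace.go, hpre]]
        rw [ih fuel (c :: acc) (by simpa using Nat.le_of_succ_le_succ hle)]
        simp [hc]

theorem replace_single (k : Char) (new l : List Char) :
    PySem.Chars.replace l [k] new = l.flatMap (fun c => if c = k then new else [c]) := by
  rw [PySem.Chars.replace]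
  simp only [List.isEmpty_cons, Bool.false_eq_true, if_false]
  simpa using replace_go_single k new l l.length [] (le_refl _)

theorem join_nil_flatten (xs : List (List Char)) : PySem.Chars.join [] xs = xs.flatten := by
  rw [PySem.Chars.join]
  induction xs with
  | nil => simp [List.intercalate]
  | cons a t ih =>
    cases t with
    | nil => simp [List.intercalate]
    | cons b u =>
      simp [List.intercalate, List.intersperse] at *
      simpa [List.intercalate] using ih

-- the four replace passes composed, per character, equal B's if/elif chain
theorem perchar (c : Char) :
    (((((if c = '"' then ("&quot;" : String).toList else [c]).flatMap
        (fun c => if c = '\'' then ("&#039;" : String).toList else [c])).flatMap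
        (fun c => if c = '<' then ("&lt;" : String).toList else [c])).flatMap
        (fun c => if c = '>' then ("&gt;" : String).toList else [c]))) =
      (escCMT c).toList := by
  by_cases h1 : c = '"'
  · subst h1; decide
  by_cases h2 : c = '\''
  · subst h2; decide
  by_cases h3 : c = '<'
  · subst h3; decide
  by_cases h4 : c = '>'
  · subst h4; decide
  simp [escCMT, h1, h2, h3, h4]

set_option maxHeartbeats 1000000 in
theorem CheckMessageText_spec : Claim_equal_CheckMessageText := by
  intro s _
  unfold Spec_CheckMessageText CheckMessageText CheckMessageText_alt
  apply String.toList_inj.mp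
  have hitems : (PySem.Dict.ofList [(("\"" : String), ("&quot;" : String)), ("'", "&#039;"), ("<", "&lt;"), (">", "&gt;")]).items
      = [("\"", "&quot;"), ("'", "&#039;"), ("<", "&lt;"), (">", "&gt;")] := by decide
  simp only [hitems, List.foldl_cons, List.foldl_nil,
             PySem.Str.toList_replace, PySem.Str.toList_join,
             PySem.List.foldl_append_singleton_eq_map, List.nil_append, List.map_map]
  have he : ("" : String).toList = ([] : List Char) := rfl
  rw [he, join_nil_flatten]
  have hq : ("\"" : String).toList = ['"'] := rfl
  have ha : ("'" : String).toList = ['\''] := rfl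
  have hl : ("<" : String).toList = ['<'] := rfl
  have hg : (">" : String).toList = ['>'] := rfl
  rw [hq, ha, hl, hg,
      replace_single, replace_single, replace_single, replace_single,
      List.flatMap_assoc, List.flatMap_assoc, List.flatMap_assoc,
      List.flatMap_def]
  congr 1
  apply List.map_congr_left
  intro c _
  have h := perchar c
  simp only [List.flatMap_assoc] at h
  simpa using h
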